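-- pv_equiv track=rewrite | github.com/khk1262/PS | Code/2021_kakao_신규아이디추천.py | remove_dot
-- ===== SOURCE A (Python) =====
-- def remove_dot(s):
--     temp = ''
--     dot_cnt = 0
--     for i in range(len(s)):
--         if s[i] == '.':
--             dot_cnt += 1
--         else:
--             dot_cnt = 0
--         if dot_cnt < 2:
--             temp += s[i]
--
--     if len(temp) == 1 and temp[0] == '.':
--         temp = ''
--     elif len(temp) > 1:
--         if temp[0] == '.':
--             temp = temp[1:]
--         if temp[-1] == '.':
--             temp = temp[:-1]
--     return temp
-- ===== SOURCE B (Python) =====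
-- def remove_dot(s):
--     return '.'.join(p for p in s.split('.') if p)
-- ===== Notes on version B (the rewrite author's own statement) =====
-- stated objective: idiomatic
-- what changed: A's per-character state machine (dot counter, conditional append, then edge-dot trimming) is replaced by a token pass: split on the dot separator, drop empty segments, rejoin.
import Mathlib
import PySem

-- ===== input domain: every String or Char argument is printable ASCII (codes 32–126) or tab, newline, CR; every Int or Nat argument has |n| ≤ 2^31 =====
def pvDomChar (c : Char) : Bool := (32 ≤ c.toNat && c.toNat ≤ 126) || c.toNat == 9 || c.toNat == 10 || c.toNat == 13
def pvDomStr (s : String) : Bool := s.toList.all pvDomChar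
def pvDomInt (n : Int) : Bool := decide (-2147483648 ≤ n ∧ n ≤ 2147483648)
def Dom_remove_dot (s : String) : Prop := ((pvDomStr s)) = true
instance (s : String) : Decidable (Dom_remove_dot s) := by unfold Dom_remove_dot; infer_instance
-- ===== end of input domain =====

-- B replaces A's per-character dot-counter state machine by a split / drop-empty-segments / rejoin token pass — same result, a more idiomatic one-liner (and it avoids A's repeated string concatenation).

-- ===== PORT A =====
-- the loop body of A: dot_cnt update, then conditional append of s[i]
def pvStepA (st : List Char × Int) (c : Char) : List Char × Int :=
  let dc : Int := if c == '.' then st.2 + 1 else 0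
  (if dc < 2 then st.1 ++ [c] else st.1, dc)

def remove_dot (s : String) : String :=
  let temp := (s.toList.foldl pvStepA ([], 0)).1
  let temp2 :=
    if temp.length == 1 && (PySem.List.pyGet? temp 0 == some '.') then ([] : List Char)
    else if 1 < temp.length then
      let t1 := if PySem.List.pyGet? temp 0 == some '.' then PySem.List.slice temp (some 1) none else temp
      if PySem.List.pyGet? t1 (-1) == some '.' then PySem.List.slice t1 none (some (-1)) else t1
    else temp
  String.ofList temp2

-- ===== PORT B =====
def remove_dot_alt (s : String) : String :=
  String.ofList (PySem.Chars.join ['.']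
    ((PySem.Chars.splitOn s.toList ['.']).filter (fun p => !p.isEmpty)))

-- ===== PRECONDITION & SPEC =====
def Spec_remove_dot (s : String) (out : String) : Prop := out = remove_dot_alt s
instance (s : String) (out : String) : Decidable (Spec_remove_dot s out) := by unfold Spec_remove_dot; infer_instance

-- ===== CLAIM (what is proved, stated in full; the proofs are below) =====
def Claim_equal_remove_dot : Prop := ∀ (s : String), Dom_remove_dot s → Spec_remove_dot s (remove_dot s)

-- ===== LEMMAS AND PROOFS =====

-- what A's loop computes: consecutive dots collapsed; the Bool = "previous kept char run ends in a dot"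
def pvDedup : List Char → Bool → List Char
  | [], _ => []
  | c :: r, b => if c = '.' then (if b then pvDedup r true else '.' :: pvDedup r true) else c :: pvDedup r false

lemma foldA : ∀ (cs : List Char) (t : List Char) (d : Int), 0 ≤ d →
    (cs.foldl pvStepA (t, d)).1 = t ++ pvDedup cs (decide (1 ≤ d)) := by
  intro cs
  induction cs with
  | nil => intro t d _; simp [pvDedup]
  | cons c r ih =>
    intro t d hd0
    by_cases hc : c = '.'
    · subst hc
      by_cases hd : 1 ≤ d
      · have h2 : ¬ ((d + 1 : Int) < 2) := by omega
        have := ih t (d + 1) (by omega)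
        simp only [List.foldl_cons, pvStepA, beq_self_eq_true, if_true, if_neg h2] at this ⊢
        rw [this]
        simp [pvDedup, hd, show (1 : Int) ≤ d + 1 by omega]
      · have hd' : d = 0 := by omega
        subst hd'
        have := ih (t ++ ['.']) 1 (by omega)
        simp only [List.foldl_cons, pvStepA, beq_self_eq_true, if_true] at this ⊢
        norm_num at this ⊢
        rw [this]
        simp [pvDedup]
    · have hcb : (c == '.') = false := by simp [hc]
      have := ih (t ++ [c]) 0 (by omega)
      simp only [List.foldl_cons, pvStepA, hcb] at this ⊢
      norm_num at this ⊢
      rw [this]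
      simp [pvDedup, hc]

-- join with '.' as a plain structural recursion
def pvJoin : List (List Char) → List Char
  | [] => []
  | [a] => a
  | a :: b :: t => a ++ '.' :: pvJoin (b :: t)

lemma intercalate_eq_pvJoin : ∀ l, List.intercalate ['.'] l = pvJoin l := by
  intro l
  induction l using pvJoin.induct with
  | case1 => simp [List.intercalate, pvJoin]
  | case2 a => simp [List.intercalate, pvJoin]
  | case3 a b t ih =>
    simp only [List.intercalate, List.intersperse_cons₂, List.flatten_cons, pvJoin] at ih ⊢
    rw [ih]
    simp

-- PySem's fuel-based splitOn on separator "." is Mathlib's List.splitOn '.'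
lemma go_bridge : ∀ (fuel : Nat) (l cur : List Char) (acc : List (List Char)), l.length ≤ fuel →
    PySem.Chars.splitOn.go ['.'] fuel l cur acc
      = acc.reverse ++ (l.splitOn '.').modifyHead (cur.reverse ++ ·) := by
  intro fuel
  induction fuel with
  | zero =>
    intro l cur acc hl
    have : l = [] := by simpa using hl
    subst this
    simp [PySem.Chars.splitOn.go, List.splitOn]
  | succ f ih =>
    intro l cur acc hl
    cases l with
    | nil => simp [PySem.Chars.splitOn.go, List.splitOn]
    | cons c rest =>
      by_cases hc : c = '.'
      · subst hc
        have hpre : (['.'] : List Char).isPrefixOf ('.' :: rest) = true := by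
          simp [List.isPrefixOf]
        rw [PySem.Chars.splitOn.go]
        simp only [hpre, if_true, List.length_cons, List.length_nil, List.drop_succ_cons, List.drop_zero]
        rw [ih rest [] (cur.reverse :: acc) (by simpa using hl)]
        simp only [List.splitOn, List.splitOnP_cons, beq_self_eq_true, if_true,
          List.reverse_cons, List.reverse_nil, List.nil_append, List.modifyHead_cons,
          List.append_assoc, List.cons_append, List.append_nil]
        have hid : List.modifyHead (fun x : List Char => x) (List.splitOnP (fun x => x == '.') rest)
            = List.splitOnP (fun x => x == '.') rest := congrFun List.modifyHead_id _
        rw [hid]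
      · have hpre : (['.'] : List Char).isPrefixOf (c :: rest) = false := by
          simp [List.isPrefixOf, Ne.symm hc]
        rw [PySem.Chars.splitOn.go]
        simp only [hpre, Bool.false_eq_true, if_false]
        rw [ih rest (c :: cur) acc (by simpa using Nat.le_of_succ_le_succ hl)]
        obtain ⟨h, t, ht⟩ := List.exists_cons_of_ne_nil (List.splitOnP_ne_nil (· == '.') rest)
        simp [List.splitOn, List.splitOnP_cons, hc, ht]

lemma splitOn_bridge (cs : List Char) : PySem.Chars.splitOn cs ['.'] = cs.splitOn '.' := by
  rw [PySem.Chars.splitOn, go_bridge (cs.length + 1) cs [] [] (by omega)]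
  simp only [List.reverse_nil, List.nil_append]
  exact congrFun List.modifyHead_id _

def pvSegs (cs : List Char) : List (List Char) := (cs.splitOn '.').filter (fun p => !p.isEmpty)

def pvPost (cs : List Char) : List Char :=
  if pvSegs cs ≠ [] ∧ cs.getLast? = some '.' then ['.'] else []

lemma segs_dot_cons (r : List Char) : pvSegs ('.' :: r) = pvSegs r := by
  simp [pvSegs, List.splitOn, List.splitOnP_cons]

lemma segs_nil_all_dots : ∀ cs, pvSegs cs = [] → ∀ x ∈ cs, x = '.' := by
  intro cs
  induction cs with
  | nil => simp
  | cons c r ih =>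
    intro hs x hx
    by_cases hc : c = '.'
    · subst hc
      rw [segs_dot_cons] at hs
      rcases List.mem_cons.mp hx with rfl | hx
      · rfl
      · exact ih hs x hx
    · exfalso
      obtain ⟨h, t, ht⟩ := List.exists_cons_of_ne_nil (List.splitOnP_ne_nil (· == '.') r)
      simp [pvSegs, List.splitOn, List.splitOnP_cons, hc, ht] at hs

lemma dedup_false (cs : List Char) :
    pvDedup cs false = (if cs.head? = some '.' then ['.'] else []) ++ pvDedup cs true := by
  cases cs with
  | nil => simp [pvDedup]
  | cons c r =>
    by_cases hc : c = '.'
    · subst hc; simp [pvDedup]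
    · simp [pvDedup, hc]

lemma getLast?_all_dots (cs : List Char) (hne : cs ≠ []) (hall : ∀ x ∈ cs, x = '.') :
    cs.getLast? = some '.' := by
  rw [List.getLast?_eq_some_getLast hne]
  exact congrArg some (hall _ (List.getLast_mem hne))

lemma dedup_true : ∀ cs, pvDedup cs true = pvJoin (pvSegs cs) ++ pvPost cs := by
  intro cs
  induction cs with
  | nil => simp [pvDedup, pvSegs, pvPost, List.splitOn, pvJoin]
  | cons c r ih =>
    by_cases hc : c = '.'
    · subst hc
      have hL : pvDedup ('.' :: r) true = pvDedup r true := by simp [pvDedup]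
      rw [hL, ih, segs_dot_cons]
      by_cases hs : pvSegs r = []
      · simp [pvPost, segs_dot_cons, hs]
      · have hrne : r ≠ [] := by rintro rfl; exact hs rfl
        have : ('.' :: r).getLast? = r.getLast? := by
          obtain ⟨y, r', rfl⟩ := List.exists_cons_of_ne_nil hrne
          exact List.getLast?_cons_cons ..
        simp [pvPost, segs_dot_cons, this]
    · -- c is not a dot
      have hL : pvDedup (c :: r) true = c :: pvDedup r false := by simp [pvDedup, hc]
      cases r with
      | nil =>
        simp [pvDedup, pvSegs, List.splitOn, List.splitOnP_cons, hc, pvJoin, pvPost]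
      | cons d r2 =>
        by_cases hd : d = '.'
        · subst hd
          -- r = '.' :: r2
          have hsegsr : pvSegs ('.' :: r2) = pvSegs r2 := segs_dot_cons r2
          have hsegs : pvSegs (c :: '.' :: r2) = [c] :: pvSegs r2 := by
            simp [pvSegs, List.splitOn, List.splitOnP_cons, hc]
          have hstep : pvDedup (c :: '.' :: r2) true = c :: '.' :: pvDedup r2 true := by
            simp [pvDedup, hc]
          rw [hstep, hsegs]
          have ihr : pvDedup ('.' :: r2) true = pvJoin (pvSegs r2) ++ pvPost ('.' :: r2) := by
            rw [ih, hsegsr]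
          by_cases hs2 : pvSegs r2 = []
          · -- everything after c is dots
            have hpost2 : pvPost ('.' :: r2) = [] := by simp [pvPost, hsegsr, hs2]
            have hded2 : pvDedup r2 true = [] := by
              have := ih
              rw [show pvDedup ('.' :: r2) true = pvDedup r2 true by simp [pvDedup]] at ihr
              rw [ihr, hs2, hpost2]; simp [pvJoin]
            have hlast : (c :: '.' :: r2).getLast? = some '.' := by
              rw [show (c :: '.' :: r2).getLast? = ('.' :: r2).getLast? from List.getLast?_cons_cons ..]
              exact getLast?_all_dots _ (by simp) (by
                intro x hx
                rcases List.mem_cons.mp hx with rfl | hx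
                · rfl
                · exact segs_nil_all_dots r2 hs2 x hx)
            rw [hded2, hs2]
            simp [pvJoin, pvPost, hsegs, hs2, hlast]
          · have hjoin : pvJoin ([c] :: pvSegs r2) = c :: '.' :: pvJoin (pvSegs r2) := by
              obtain ⟨y, t, hy⟩ := List.exists_cons_of_ne_nil hs2
              rw [hy]; simp [pvJoin]
            have hpost : pvPost (c :: '.' :: r2) = pvPost ('.' :: r2) := by
              simp [pvPost, hsegs, hsegsr, hs2, List.getLast?_cons_cons]
            rw [hjoin, hpost]
            rw [show pvDedup ('.' :: r2) true = pvDedup r2 true by simp [pvDedup]] at ihr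
            rw [ihr]
            simp
        · -- r = d :: r2 with d non-dot: first split piece of r is nonempty
          obtain ⟨h, t, ht⟩ := List.exists_cons_of_ne_nil (List.splitOnP_ne_nil (· == '.') r2)
          have hsegsr : pvSegs (d :: r2) = (d :: h) :: (t.filter (fun p => !p.isEmpty)) := by
            simp [pvSegs, List.splitOn, List.splitOnP_cons, hd, ht]
          have hsegs : pvSegs (c :: d :: r2) = (c :: d :: h) :: (t.filter (fun p => !p.isEmpty)) := by
            simp [pvSegs, List.splitOn, List.splitOnP_cons, hc, hd, ht]
          have hstep : pvDedup (c :: d :: r2) true = c :: pvDedup (d :: r2) false := by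
            simp [pvDedup, hc]
          have hfalse : pvDedup (d :: r2) false = pvDedup (d :: r2) true := by
            rw [dedup_false]; simp [hd]
          have hjoin : ∀ (x : List Char) (ts : List (List Char)) (a : Char),
              pvJoin ((a :: x) :: ts) = a :: pvJoin (x :: ts) := by
            intro x ts a
            cases ts with
            | nil => simp [pvJoin]
            | cons b ts' => simp [pvJoin]
          have hpost : pvPost (c :: d :: r2) = pvPost (d :: r2) := by
            simp [pvPost, hsegs, hsegsr, List.getLast?_cons_cons]
          rw [hstep, hfalse, ih, hsegs, hpost, hsegsr, hjoin, hjoin, hjoin]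
          simp

lemma splitOn_dotfree : ∀ (cs : List Char) (x : List Char), x ∈ cs.splitOn '.' → '.' ∉ x := by
  intro cs
  induction cs with
  | nil => simp [List.splitOn]
  | cons c r ih =>
    intro x hx
    by_cases hc : c = '.'
    · subst hc
      simp only [List.splitOn, List.splitOnP_cons, beq_self_eq_true, if_true, List.mem_cons] at hx
      rcases hx with rfl | hx
      · simp
      · exact ih x hx
    · obtain ⟨h, t, ht⟩ := List.exists_cons_of_ne_nil (List.splitOnP_ne_nil (· == '.') r)
      have hh : h ∈ r.splitOn '.' := by rw [List.splitOn, ht]; exact List.mem_cons_self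
      simp only [List.splitOn, List.splitOnP_cons, beq_iff_eq, hc, if_false, ht,
        List.modifyHead_cons, List.mem_cons] at hx
      rcases hx with rfl | hx
      · intro hmem
        rcases List.mem_cons.mp hmem with h1 | h1
        · exact hc h1.symm
        · exact ih h hh h1
      · exact ih x (by rw [List.splitOn, ht]; exact List.mem_cons_of_mem _ hx)

lemma segs_sound : ∀ cs x, x ∈ pvSegs cs → x ≠ [] ∧ '.' ∉ x := by
  intro cs x hx
  rw [pvSegs, List.mem_filter] at hx
  refine ⟨by simpa using hx.2, splitOn_dotfree cs x hx.1⟩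

lemma join_head : ∀ (l : List (List Char)), l ≠ [] → (∀ x ∈ l, x ≠ [] ∧ '.' ∉ x) →
    ∃ c, (pvJoin l).head? = some c ∧ c ≠ '.' := by
  intro l hl hall
  obtain ⟨a, t, rfl⟩ := List.exists_cons_of_ne_nil hl
  obtain ⟨ha, hdot⟩ := hall a List.mem_cons_self
  obtain ⟨c0, a', rfl⟩ := List.exists_cons_of_ne_nil ha
  refine ⟨c0, ?_, fun h => hdot (h ▸ List.mem_cons_self)⟩
  cases t with
  | nil => simp [pvJoin]
  | cons b t' => simp [pvJoin]

lemma join_last : ∀ (l : List (List Char)), l ≠ [] → (∀ x ∈ l, x ≠ [] ∧ '.' ∉ x) →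
    ∃ c, (pvJoin l).getLast? = some c ∧ c ≠ '.' := by
  intro l
  induction l using pvJoin.induct with
  | case1 => intro h; exact absurd rfl h
  | case2 a =>
    intro _ hall
    obtain ⟨ha, hdot⟩ := hall a List.mem_cons_self
    refine ⟨a.getLast ha, ?_, fun h => hdot (h ▸ List.getLast_mem ha)⟩
    simp [pvJoin, List.getLast?_eq_some_getLast ha]
  | case3 a b t ih =>
    intro _ hall
    obtain ⟨c, hc, hcne⟩ := ih (by simp) (fun x hx => hall x (List.mem_cons_of_mem _ hx))
    have hne : pvJoin (b :: t) ≠ [] := by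
      intro h; rw [h] at hc; simp at hc
    refine ⟨c, ?_, hcne⟩
    obtain ⟨y, m', hm⟩ := List.exists_cons_of_ne_nil hne
    rw [pvJoin, List.getLast?_append_cons, hm, List.getLast?_cons_cons, ← hm]
    exact hc

lemma fixup_eq (cs : List Char) :
    (let temp := pvDedup cs false
     if temp.length == 1 && (PySem.List.pyGet? temp 0 == some '.') then ([] : List Char)
     else if 1 < temp.length then
       let t1 := if PySem.List.pyGet? temp 0 == some '.' then PySem.List.slice temp (some 1) none else temp
       if PySem.List.pyGet? t1 (-1) == some '.' then PySem.List.slice t1 none (some (-1)) else t1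
     else temp) = pvJoin (pvSegs cs) := by
  by_cases hs : pvSegs cs = []
  · cases cs with
    | nil => simp [pvDedup, pvSegs, List.splitOn, pvJoin]
    | cons c r =>
      have hc : c = '.' := segs_nil_all_dots _ hs c List.mem_cons_self
      subst hc
      have htemp : pvDedup ('.' :: r) false = ['.'] := by
        rw [dedup_false, dedup_true, hs]
        simp [pvJoin, pvPost, hs]
      rw [hs]
      simp only [htemp, pvJoin]
      decide
  · have hall := segs_sound cs
    obtain ⟨c0, hh, hc0⟩ := join_head _ hs (fun x hx => hall x hx)
    obtain ⟨c1, hl, hc1⟩ := join_last _ hs (fun x hx => hall x hx)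
    have htemp : pvDedup cs false
        = (if cs.head? = some '.' then ['.'] else []) ++ pvJoin (pvSegs cs) ++ pvPost cs := by
      rw [dedup_false, dedup_true, List.append_assoc]
    have hpostdef : pvPost cs = [] ∨ pvPost cs = ['.'] := by
      rw [pvPost]; split <;> simp
    generalize hJg : pvJoin (pvSegs cs) = J at hh hl htemp ⊢
    have hJne : J ≠ [] := by rintro rfl; simp at hh
    have hJlen : J.length ≠ 0 := fun h => hJne (List.length_eq_zero_iff.mp h)
    have hget0 : PySem.List.pyGet? J 0 = some c0 := by
      rw [PySem.List.pyGet?_zero, ← List.head?_eq_getElem?]; exact hh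
    have hc0' : (some c0 == some '.') = false := by simp [hc0]
    have hc1' : (some c1 == some '.') = false := by simp [hc1]
    by_cases hpre : cs.head? = some '.' <;> rcases hpostdef with hpost | hpost <;>
      simp only [hpre, if_true, if_false, hpost, List.append_nil, List.nil_append,
        List.singleton_append] at htemp <;> rw [htemp]
    · -- pre = ['.'], post = []
      have hlen : (('.' :: J).length == 1) = false :=
        beq_eq_false_iff_ne.mpr (by simp only [List.length_cons]; omega)
      have hlt : 1 < ('.' :: J).length := by simp only [List.length_cons]; omega
      simp only [hlen, Bool.false_and, Bool.false_eq_true, if_false, hlt, if_true,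
        PySem.List.pyGet?_zero_cons, beq_self_eq_true, PySem.List.slice_from_one, List.tail_cons,
        PySem.List.pyGet?_neg_one, hl, hc1']
    · -- pre = ['.'], post = ['.']
      have hlen : (('.' :: (J ++ ['.'])).length == 1) = false :=
        beq_eq_false_iff_ne.mpr (by simp)
      have hlt : 1 < ('.' :: (J ++ ['.'])).length := by simp
      simp [PySem.List.slice_from_one, PySem.List.pyGet?_neg_one_append_singleton,
        PySem.List.slice_to_neg_one]
    · -- pre = [], post = []
      have hgetl : (PySem.List.pyGet? J (-1) == some '.') = false := by
        rw [PySem.List.pyGet?_neg_one, hl]; exact hc1'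
      by_cases hlen : (J.length == 1) = true
      · simp only [hlen, Bool.true_and, hget0, hc0', Bool.false_eq_true, if_false]
        have : ¬ 1 < J.length := by simp only [beq_iff_eq] at hlen; omega
        simp [this]
      · simp only [Bool.not_eq_true] at hlen
        simp only [hlen, Bool.false_and, Bool.false_eq_true, if_false, hget0, hc0', hgetl]
        split <;> simp
    · -- pre = [], post = ['.']
      obtain ⟨y, m, rfl⟩ := List.exists_cons_of_ne_nil hJne
      have hy : y = c0 := by simpa using hh
      subst hy
      simp only [PySem.List.pyGet?_neg_one]
      have h1 : (y :: (m ++ ['.'])).getLast? = some '.' := by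
        rw [← List.cons_append, List.getLast?_concat]
      have h2 : PySem.List.slice (y :: (m ++ ['.'])) none (some (-1)) = y :: m := by
        rw [← List.cons_append, PySem.List.slice_to_neg_one, List.dropLast_concat]
      simp [hc0, h1, h2]

-- ===== VERDICT (by name: the statement is the Claim_ definition above) =====
theorem remove_dot_spec : Claim_equal_remove_dot := by
  intro s _
  unfold Spec_remove_dot remove_dot remove_dot_alt
  have hfold : (s.toList.foldl pvStepA ([], 0)).1 = pvDedup s.toList false := by
    rw [foldA s.toList [] 0 (by omega)]; simp
  simp only [hfold]
  rw [splitOn_bridge]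
  have hjoin : PySem.Chars.join ['.'] ((s.toList.splitOn '.').filter (fun p => !p.isEmpty))
      = pvJoin (pvSegs s.toList) := by
    rw [PySem.Chars.join, intercalate_eq_pvJoin, pvSegs]
  rw [hjoin]
  exact congrArg String.ofList (fixup_eq s.toList)
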